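-- pv_equiv track=rewrite | github.com/echoix/slipcover | slipcover/slipcover.py | format_missing
-- ===== SOURCE A (Python) =====
-- from typing import Dict, Set, List
--
-- def format_missing(missing_lines: List[int], executed_lines: List[int],
--                    missing_branches: List[tuple]) -> List[str]:
--     missing_set = set(missing_lines)
--     missing_branches = [(a,b) for a,b in missing_branches if a not in missing_set and b not in missing_set]
--
--     def format_branch(br):
--         return f"{br[0]}->exit" if br[1] == 0 else f"{br[0]}->{br[1]}"
--
--     """Formats ranges of missing lines, including non-code (e.g., comments) ones that fall
--        between missed ones"""
--     def find_ranges():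
--         executed = set(executed_lines)
--         it = iter(missing_lines)    # assumed sorted
--         a = next(it, None)
--         while a is not None:
--             while missing_branches and missing_branches[0][0] < a:
--                 yield format_branch(missing_branches.pop(0))
--
--             b = a
--             n = next(it, None)
--             while n is not None:
--                 if any(l in executed for l in range(b+1, n+1)):
--                     break
--
--                 b = n
--                 n = next(it, None)
--
--             yield str(a) if a == b else f"{a}-{b}"
--
--             a = n
--
--         while missing_branches:
--             yield format_branch(missing_branches.pop(0))
--
--     return ", ".join(find_ranges())
-- ===== SOURCE B (Python) =====
-- def format_missing(missing_lines, executed_lines, missing_branches):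
--     missing_set = set(missing_lines)
--     branch_texts = [
--         (a, f"{a}->exit" if b == 0 else f"{a}->{b}")
--         for a, b in missing_branches
--         if a not in missing_set and b not in missing_set]
--
--     xs = sorted(set(executed_lines))
--
--     def first_greater(x):
--         # index of the first element of xs greater than x (binary search)
--         lo, hi = 0, len(xs)
--         while lo < hi:
--             mid = (lo + hi) // 2
--             if xs[mid] <= x:
--                 lo = mid + 1
--             else:
--                 hi = mid
--         return lo
--
--     # Phase 1: fold missing_lines into maximal runs not interrupted by an executed line.
--     groups = []
--     for n in missing_lines:
--         if groups:
--             i = first_greater(groups[-1][1])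
--             if i == len(xs) or xs[i] > n:  # no executed line inside the gap
--                 groups[-1][1] = n
--                 continue
--         groups.append([n, n])
--
--     # Phase 2: merge the pre-formatted branch texts (those whose source line is
--     # before a group's start) in front of each group's text.
--     parts = []
--     j = 0
--     for a, b in groups:
--         while j < len(branch_texts) and branch_texts[j][0] < a:
--             parts.append(branch_texts[j][1])
--             j += 1
--         parts.append(str(a) if a == b else f"{a}-{b}")
--     parts.extend(t for _, t in branch_texts[j:])
--     return ", ".join(parts)
-- ===== Notes on version B (the rewrite author's own statement) =====
-- stated objective: alternative
-- what changed: Replaces A's generator that scans every integer of each gap against an executed-lines set and pops branches from the list front with a two-phase pass: a fold that groups missing lines by binary-searching a sorted deduplicated executed list per gap, then a merge of pre-formatted branch texts via an index pointer.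
import Mathlib
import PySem

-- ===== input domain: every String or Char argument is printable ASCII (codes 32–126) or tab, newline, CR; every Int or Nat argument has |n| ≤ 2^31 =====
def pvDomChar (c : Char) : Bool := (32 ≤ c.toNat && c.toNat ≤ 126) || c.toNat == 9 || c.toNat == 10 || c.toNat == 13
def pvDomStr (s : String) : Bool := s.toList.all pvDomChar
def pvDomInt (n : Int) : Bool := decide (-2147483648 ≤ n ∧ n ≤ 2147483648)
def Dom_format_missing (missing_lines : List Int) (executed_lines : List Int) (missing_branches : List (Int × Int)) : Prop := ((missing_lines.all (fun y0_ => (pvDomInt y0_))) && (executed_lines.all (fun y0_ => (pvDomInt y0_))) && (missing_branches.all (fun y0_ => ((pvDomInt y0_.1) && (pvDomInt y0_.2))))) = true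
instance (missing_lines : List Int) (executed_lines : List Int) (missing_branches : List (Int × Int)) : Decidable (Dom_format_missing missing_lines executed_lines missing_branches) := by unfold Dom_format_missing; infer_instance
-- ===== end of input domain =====

-- B replaces A's generator (per-gap integer-range scan against a set + pop(0) on branches) by a
-- two-phase pass: a grouping fold that binary-searches a sorted executed list per gap, then a
-- merge of pre-formatted branch texts with an index pointer; objective: alternative algorithm.


-- ===== PORT A =====
-- format_branch(br)
def pvFmtBranch (br : Int × Int) : String :=
  if br.2 = 0 then PySem.Int.toStr br.1 ++ "->exit"
  else PySem.Int.toStr br.1 ++ "->" ++ PySem.Int.toStr br.2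

-- "while missing_branches and missing_branches[0][0] < a: yield format_branch(missing_branches.pop(0))"
-- returns (the yielded strings, the remaining branch list)
def pvPopBranches (brs : List (Int × Int)) (a : Int) : List String × List (Int × Int) :=
  match brs with
  | [] => ([], [])
  | br :: rest =>
    if br.1 < a then
      let p := pvPopBranches rest a
      (pvFmtBranch br :: p.1, p.2)
    else ([], br :: rest)

-- inner "while n is not None: if any(l in executed for l in range(b+1, n+1)): break; b = n; n = next(it,None)"
-- returns (final b, the unconsumed tail of the iterator, n being its head)
def pvExtend (executed : PySem.Set Int) (b : Int) (rest : List Int) : Int × List Int :=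
  match rest with
  | [] => (b, [])
  | n :: rest' =>
    if (PySem.List.pyRange (b + 1) (n + 1) 1).any (fun l => PySem.Set.contains executed l) then
      (b, n :: rest')
    else
      pvExtend executed n rest'

-- termination helper for pvFindRanges (cited in its decreasing_by)
lemma pvExtend_len (executed : PySem.Set Int) (b : Int) (rest : List Int) :
    (pvExtend executed b rest).2.length ≤ rest.length := by
  induction rest generalizing b with
  | nil => simp [pvExtend]
  | cons n rest' ih =>
    simp only [pvExtend]
    split
    · simp
    · exact le_trans (ih n) (Nat.le_succ _)

-- the generator find_ranges(): outer "while a is not None" loop over the iterator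
def pvFindRanges (executed : PySem.Set Int) : List Int → List (Int × Int) → List String
  | [], brs => brs.map pvFmtBranch
  | a :: it, brs =>
    let p := pvPopBranches brs a
    let e := pvExtend executed a it
    p.1 ++ ((if a = e.1 then PySem.Int.toStr a
             else PySem.Int.toStr a ++ "-" ++ PySem.Int.toStr e.1)
            :: pvFindRanges executed e.2 p.2)
  termination_by it _ => it.length
  decreasing_by
    exact Nat.lt_succ_of_le (pvExtend_len executed a it)

def format_missing (missing_lines : List Int) (executed_lines : List Int) (missing_branches : List (Int × Int)) : String :=
  let missing_set := PySem.Set.ofList missing_lines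
  let mb := missing_branches.filter
    (fun br => !(PySem.Set.contains missing_set br.1) && !(PySem.Set.contains missing_set br.2))
  PySem.Str.join ", " (pvFindRanges (PySem.Set.ofList executed_lines) missing_lines mb)

-- ===== PORT B =====
-- the f-string of a filtered branch, pre-formatted in the comprehension
def pvBranchText (a b : Int) : String :=
  if b = 0 then PySem.Int.toStr a ++ "->exit"
  else PySem.Int.toStr a ++ "->" ++ PySem.Int.toStr b

-- first_greater's "while lo < hi" loop; lo, hi are in-range non-negative Python ints, so Nat
-- with Nat division is exact for "(lo + hi) // 2", and xs[mid] (0 ≤ mid < len(xs)) is pyGetD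
def pvFirstGreaterLoop (xs : List Int) (x : Int) (lo hi : Nat) : Nat :=
  if lo < hi then
    let mid := (lo + hi) / 2
    if PySem.List.pyGetD xs (mid : Int) 0 ≤ x then pvFirstGreaterLoop xs x (mid + 1) hi
    else pvFirstGreaterLoop xs x lo mid
  else lo
  termination_by hi - lo
  decreasing_by all_goals omega

-- first_greater(x): index in xs of the first element greater than x
def pvFirstGreater (xs : List Int) (x : Int) : Nat := pvFirstGreaterLoop xs x 0 xs.length

-- Phase-1 loop body: extend the last group (head of the reversed accumulator) or open a new one
def pvGroupStep (xs : List Int) (gs : List (Int × Int)) (n : Int) : List (Int × Int) :=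
  match gs with
  | (a, b) :: rest =>
    let i := pvFirstGreater xs b
    if i = xs.length ∨ n < PySem.List.pyGetD xs (i : Int) 0 then (a, n) :: rest
    else (n, n) :: (a, b) :: rest
  | [] => [(n, n)]

-- Phase-2 loop: per group flush branch texts with source line < a (index pointer j), then the
-- group's text; finally the leftover branch texts
def pvEmit : List (Int × Int) → List (Int × String) → List String
  | [], bts => bts.map Prod.snd
  | (a, b) :: gs, bts =>
    (bts.takeWhile (fun t => decide (t.1 < a))).map Prod.snd
      ++ ((if a = b then PySem.Int.toStr a
           else PySem.Int.toStr a ++ "-" ++ PySem.Int.toStr b)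
          :: pvEmit gs (bts.dropWhile (fun t => decide (t.1 < a))))

def format_missing_alt (missing_lines : List Int) (executed_lines : List Int) (missing_branches : List (Int × Int)) : String :=
  let missing_set := PySem.Set.ofList missing_lines
  let branch_texts := (missing_branches.filter
      (fun br => !(PySem.Set.contains missing_set br.1) && !(PySem.Set.contains missing_set br.2))).map
      (fun br => (br.1, pvBranchText br.1 br.2))
  let xs := PySem.List.sorted (PySem.Set.ofList executed_lines) (fun x => x) false
  let groups := (missing_lines.foldl (pvGroupStep xs) []).reverse
  PySem.Str.join ", " (pvEmit groups branch_texts)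

-- ===== PRECONDITION & SPEC =====
def Spec_format_missing (missing_lines : List Int) (executed_lines : List Int) (missing_branches : List (Int × Int)) (out : String) : Prop := out = format_missing_alt missing_lines executed_lines missing_branches
instance (missing_lines : List Int) (executed_lines : List Int) (missing_branches : List (Int × Int)) (out : String) : Decidable (Spec_format_missing missing_lines executed_lines missing_branches out) := by unfold Spec_format_missing; infer_instance

-- ===== CLAIM (what is proved, stated in full; the proofs are below) =====
def Claim_equal_format_missing : Prop := ∀ (missing_lines : List Int) (executed_lines : List Int) (missing_branches : List (Int × Int)), Dom_format_missing missing_lines executed_lines missing_branches → Spec_format_missing missing_lines executed_lines missing_branches (format_missing missing_lines executed_lines missing_branches)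

-- ===== LEMMAS AND PROOFS =====

-- binary-search loop invariant: on a ≤-sorted list, the result r keeps xs[j] ≤ x for j < r and
-- x < xs[j] for r ≤ j
lemma pvFGL_spec (xs : List Int) (hs : xs.Pairwise (· ≤ ·)) (x : Int) :
    ∀ (k lo hi : Nat), hi - lo ≤ k → lo ≤ hi → hi ≤ xs.length →
      (∀ (j : Nat) (hj : j < xs.length), j < lo → xs[j] ≤ x) →
      (∀ (j : Nat) (hj : j < xs.length), hi ≤ j → x < xs[j]) →
      pvFirstGreaterLoop xs x lo hi ≤ xs.length ∧
      (∀ (j : Nat) (hj : j < xs.length), j < pvFirstGreaterLoop xs x lo hi → xs[j] ≤ x) ∧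
      (∀ (j : Nat) (hj : j < xs.length), pvFirstGreaterLoop xs x lo hi ≤ j → x < xs[j]) := by
  intro k
  induction k with
  | zero =>
    intro lo hi hk hle hlen hlo hhi
    have : lo = hi := by omega
    rw [pvFirstGreaterLoop]
    simp only [this, lt_irrefl, if_false]
    exact ⟨by omega, fun j hj h => hlo j hj (by omega), fun j hj h => hhi j hj (by omega)⟩
  | succ k ih =>
    intro lo hi hk hle hlen hlo hhi
    rw [pvFirstGreaterLoop]
    by_cases hlt : lo < hi
    · simp only [hlt, if_true]
      have hmid : (lo + hi) / 2 < hi ∧ lo ≤ (lo + hi) / 2 := by omega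
      have hmlen : (lo + hi) / 2 < xs.length := by omega
      have hget : PySem.List.pyGetD xs (((lo + hi) / 2 : Nat) : Int) 0 = xs[(lo + hi) / 2] := by
        rw [PySem.List.pyGetD_natCast, List.getD_eq_getElem xs 0 hmlen]
      rw [hget]
      by_cases hc : xs[(lo + hi) / 2] ≤ x
      · simp only [hc, if_true]
        refine ih ((lo + hi) / 2 + 1) hi (by omega) (by omega) hlen ?_ hhi
        intro j hj hjlt
        rcases Nat.lt_or_ge j lo with h | h
        · exact hlo j hj h
        · calc xs[j] ≤ xs[(lo + hi) / 2] := by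
                rcases Nat.lt_or_ge j ((lo + hi) / 2) with h2 | h2
                · exact (List.pairwise_iff_getElem.mp hs) j ((lo + hi) / 2) hj hmlen h2
                · have : j = (lo + hi) / 2 := by omega
                  simp [this]
               _ ≤ x := hc
      · simp only [hc, if_false]
        refine ih lo ((lo + hi) / 2) (by omega) (by omega) (by omega) hlo ?_
        intro j hj hjge
        have hx : x < xs[(lo + hi) / 2] := by omega
        calc x < xs[(lo + hi) / 2] := hx
             _ ≤ xs[j] := by
                rcases Nat.lt_or_ge ((lo + hi) / 2) j with h2 | h2
                · exact (List.pairwise_iff_getElem.mp hs) ((lo + hi) / 2) j hmlen hj h2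
                · have : j = (lo + hi) / 2 := by omega
                  simp [this]
    · simp only [hlt, if_false]
      exact ⟨by omega, fun j hj h => hlo j hj (by omega), fun j hj h => hhi j hj (by omega)⟩

-- A's gap test (the integers in (b, n] scanned against the executed set) equals B's
-- (binary search in the sorted, deduplicated executed list)
lemma pvCond_eq (el : List Int) (b n : Int) :
    ((PySem.List.pyRange (b + 1) (n + 1) 1).any
        (fun l => PySem.Set.contains (PySem.Set.ofList el) l))
      = !decide (pvFirstGreater (PySem.List.sorted (PySem.Set.ofList el) (fun x => x) false) b
                   = (PySem.List.sorted (PySem.Set.ofList el) (fun x => x) false).length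
                 ∨ n < PySem.List.pyGetD (PySem.List.sorted (PySem.Set.ofList el) (fun x => x) false)
                        ((pvFirstGreater (PySem.List.sorted (PySem.Set.ofList el) (fun x => x) false) b : Nat) : Int) 0) := by
  have hlt := PySem.List.sorted_ofList_pairwise_lt el
  set xs := PySem.List.sorted (PySem.Set.ofList el) (fun x => x) false with hxs
  have hle : xs.Pairwise (· ≤ ·) := hlt.imp (fun h => le_of_lt h)
  have hmem : ∀ l : Int, l ∈ xs ↔ l ∈ el := by
    intro l
    rw [hxs, PySem.List.mem_sorted, PySem.Set.mem_ofList]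
  obtain ⟨hr1, hr2, hr3⟩ := pvFGL_spec xs hle b xs.length 0 xs.length le_rfl (Nat.zero_le _)
    le_rfl (fun j hj h => absurd h (Nat.not_lt_zero j)) (fun j hj h => absurd hj (by omega))
  set i := pvFirstGreaterLoop xs b 0 xs.length with hi
  have hfg : pvFirstGreater xs b = i := rfl
  rw [Bool.eq_iff_iff]
  simp only [List.any_eq_true, PySem.List.mem_pyRange_one, Bool.not_eq_eq_eq_not, Bool.not_true,
    decide_eq_false_iff_not, not_or, not_lt, hfg]
  constructor
  · rintro ⟨l, ⟨h1, h2⟩, hc⟩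
    rw [PySem.Set.contains_iff, PySem.Set.mem_ofList, ← hmem] at hc
    obtain ⟨j, hj, hl⟩ := List.mem_iff_getElem.mp hc
    have hji : i ≤ j := by
      by_contra hcon
      have := hr2 j hj (by omega)
      omega
    have hilen : i < xs.length := by omega
    refine ⟨by omega, ?_⟩
    rw [PySem.List.pyGetD_natCast, List.getD_eq_getElem xs 0 hilen]
    have : xs[i] ≤ xs[j] := by
      rcases Nat.lt_or_ge i j with h2 | h2
      · exact le_of_lt ((List.pairwise_iff_getElem.mp hlt) i j hilen hj h2)
      · have : j = i := by omega
        simp [this]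
    omega
  · rintro ⟨h1, h2⟩
    have hilen : i < xs.length := by omega
    rw [PySem.List.pyGetD_natCast, List.getD_eq_getElem xs 0 hilen] at h2
    have hbx : b < xs[i] := hr3 i hilen le_rfl
    refine ⟨xs[i], ⟨by omega, by omega⟩, ?_⟩
    rw [PySem.Set.contains_iff, PySem.Set.mem_ofList, ← hmem]
    exact List.getElem_mem hilen

lemma pvPop_fst (a : Int) (brs : List (Int × Int)) :
    (pvPopBranches brs a).1 = (brs.takeWhile (fun br => decide (br.1 < a))).map pvFmtBranch := by
  induction brs with
  | nil => simp [pvPopBranches]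
  | cons br rest ih =>
    simp only [pvPopBranches, List.takeWhile_cons]
    by_cases h : br.1 < a <;> simp [h, ih]

lemma pvPop_snd (a : Int) (brs : List (Int × Int)) :
    (pvPopBranches brs a).2 = brs.dropWhile (fun br => decide (br.1 < a)) := by
  induction brs with
  | nil => simp [pvPopBranches]
  | cons br rest ih =>
    simp only [pvPopBranches, List.dropWhile_cons]
    by_cases h : br.1 < a <;> simp [h, ih]

-- proof-side recursive form of the grouping (phrased with A's pvExtend)
def pvGroupsRec (executed : PySem.Set Int) : List Int → List (Int × Int)
  | [] => []
  | a :: it =>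
    let e := pvExtend executed a it
    (a, e.1) :: pvGroupsRec executed e.2
  termination_by it => it.length
  decreasing_by
    exact Nat.lt_succ_of_le (pvExtend_len executed a it)

-- B's fold produces (reversed) exactly the groups of the recursive form
lemma pvFold_groups (el : List Int) (rest : List Int) :
    ∀ (a b : Int) (acc : List (Int × Int)),
      (List.foldl (pvGroupStep (PySem.List.sorted (PySem.Set.ofList el) (fun x => x) false))
          ((a, b) :: acc) rest).reverse
        = acc.reverse
          ++ (a, (pvExtend (PySem.Set.ofList el) b rest).1)
             :: pvGroupsRec (PySem.Set.ofList el) (pvExtend (PySem.Set.ofList el) b rest).2 := by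
  induction rest with
  | nil => intro a b acc; simp [pvExtend, pvGroupsRec]
  | cons n rest' ih =>
    intro a b acc
    simp only [List.foldl_cons, pvGroupStep, pvExtend, pvCond_eq el b n]
    by_cases h : (pvFirstGreater (PySem.List.sorted (PySem.Set.ofList el) (fun x => x) false) b
        = (PySem.List.sorted (PySem.Set.ofList el) (fun x => x) false).length
      ∨ n < PySem.List.pyGetD (PySem.List.sorted (PySem.Set.ofList el) (fun x => x) false)
             ((pvFirstGreater (PySem.List.sorted (PySem.Set.ofList el) (fun x => x) false) b : Nat) : Int) 0)
    · simp only [h, decide_true, Bool.not_true, Bool.false_eq_true, if_false, if_true]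
      exact ih a n acc
    · simp only [h, decide_false, Bool.not_false, if_true, if_false]
      rw [ih n n ((a, b) :: acc)]
      simp [pvGroupsRec]

lemma pvGroups_eq (el : List Int) (ml : List Int) :
    (ml.foldl (pvGroupStep (PySem.List.sorted (PySem.Set.ofList el) (fun x => x) false)) []).reverse
      = pvGroupsRec (PySem.Set.ofList el) ml := by
  cases ml with
  | nil => simp [pvGroupsRec]
  | cons a it =>
    simp only [List.foldl_cons, pvGroupStep]
    rw [pvFold_groups el it a a []]
    simp [pvGroupsRec]

-- the generator equals phase 2 run on the recursive groups and pre-formatted branches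
lemma pvFind_eq_emit (el : List Int) :
    ∀ (n : Nat) (it : List Int), it.length ≤ n → ∀ (brs : List (Int × Int)),
      pvFindRanges (PySem.Set.ofList el) it brs
        = pvEmit (pvGroupsRec (PySem.Set.ofList el) it)
            (brs.map (fun br => (br.1, pvBranchText br.1 br.2))) := by
  intro n
  induction n with
  | zero =>
    intro it hit brs
    rw [List.length_eq_zero_iff.mp (Nat.le_zero.mp hit)]
    simp only [pvFindRanges, pvGroupsRec, pvEmit, List.map_map]
    rfl
  | succ n ih =>
    intro it hit brs
    cases it with
    | nil =>
      simp only [pvFindRanges, pvGroupsRec, pvEmit, List.map_map]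
      rfl
    | cons a it' =>
      simp only [pvFindRanges, pvGroupsRec, pvEmit]
      rw [pvPop_fst, pvPop_snd,
          ih (pvExtend (PySem.Set.ofList el) a it').2
             (le_trans (pvExtend_len _ a it') (Nat.succ_le_succ_iff.mp hit)),
          List.takeWhile_map, List.dropWhile_map, List.map_map]
      rfl

-- ===== VERDICT (by name: the statement is the Claim_ definition above) =====
theorem format_missing_spec : Claim_equal_format_missing := by
  intro ml el mb _
  unfold Spec_format_missing format_missing format_missing_alt
  dsimp only []
  rw [pvGroups_eq, pvFind_eq_emit el (ml.length) ml le_rfl]
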